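-- pv_equiv track=rewrite | github.com/heejvely/Algorithm | Excercise/py_file/부족한 금액 계산하기.py | solution
-- ===== SOURCE A (Python) =====
-- def solution(price, money, count):
--     mon = 0
--     for i in range(1, count+1):
--         mon += i * price
--     if mon >= money:
--         answer = mon - money
--     else:
--         answer = 0
--     return answer
-- ===== SOURCE B (Python) =====
-- def solution(price, money, count):
--     n = count if count > 0 else 0
--     total = price * n * (n + 1) // 2
--     return max(total - money, 0)
-- ===== Notes on version B (the rewrite author's own statement) =====
-- stated objective: faster
-- what changed: Replaces the O(count) accumulation loop with the closed-form triangular sum price*n*(n+1)//2 and a max for the clamp.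
import Mathlib
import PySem

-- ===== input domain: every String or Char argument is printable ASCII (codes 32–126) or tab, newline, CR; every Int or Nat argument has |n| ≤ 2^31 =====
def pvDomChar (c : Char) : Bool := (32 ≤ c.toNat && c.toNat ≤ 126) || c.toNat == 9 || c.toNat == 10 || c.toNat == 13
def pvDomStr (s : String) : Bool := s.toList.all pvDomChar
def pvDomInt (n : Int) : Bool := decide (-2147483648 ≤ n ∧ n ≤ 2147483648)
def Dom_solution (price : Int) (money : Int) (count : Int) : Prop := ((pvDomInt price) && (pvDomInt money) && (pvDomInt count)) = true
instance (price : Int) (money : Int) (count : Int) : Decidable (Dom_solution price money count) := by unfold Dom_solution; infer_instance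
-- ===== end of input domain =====

-- B replaces A's O(count) summation loop by the closed-form triangular sum (faster).
-- ===== PORT A =====
def solution (price : Int) (money : Int) (count : Int) : Int :=
  let mon := (PySem.List.pyRange 1 (count + 1) 1).foldl (fun mon i => mon + i * price) 0
  if mon ≥ money then mon - money else 0

-- ===== PORT B =====
def solution_alt (price : Int) (money : Int) (count : Int) : Int :=
  let n := if count > 0 then count else 0
  let total := PySem.Int.floordiv (price * n * (n + 1)) 2
  max (total - money) 0

-- ===== PRECONDITION & SPEC =====
def Spec_solution (price : Int) (money : Int) (count : Int) (out : Int) : Prop := out = solution_alt price money count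
instance (price : Int) (money : Int) (count : Int) (out : Int) : Decidable (Spec_solution price money count out) := by unfold Spec_solution; infer_instance

-- ===== CLAIM (what is proved, stated in full; the proofs are below) =====
def Claim_equal_solution : Prop := ∀ (price : Int) (money : Int) (count : Int), Dom_solution price money count → Spec_solution price money count (solution price money count)

-- ===== LEMMAS AND PROOFS =====

-- ===== VERDICT (by name: the statement is the Claim_ definition above) =====
lemma sum_loop (price : Int) : ∀ (n : Nat) (acc : Int),
    (PySem.List.pyRange 1 ((n : Int) + 1) 1).foldl (fun mon i => mon + i * price) acc
      = acc + price * ((n * (n + 1) / 2 : Nat) : Int) := by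
  intro n
  induction n with
  | zero => intro acc; simp [PySem.List.pyRange_one_eq_nil]
  | succ k ih =>
    intro acc
    have h1 : (1 : Int) ≤ (k : Int) + 1 := by omega
    have := PySem.List.pyRange_one_succ_right (a := 1) (b := (k : Int) + 1) h1
    rw [show ((k + 1 : Nat) : Int) + 1 = ((k : Int) + 1) + 1 by push_cast; ring, this,
        List.foldl_append, ih]
    simp only [List.foldl_cons, List.foldl_nil]
    have harith : ((k + 1) * (k + 1 + 1) / 2 : Nat) = (k * (k + 1) / 2 : Nat) + (k + 1) := by
      have e1 : (k + 1) * (k + 1 + 1) = k * (k + 1) + 2 * (k + 1) := by ring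
      have hd : 2 ∣ k * (k + 1) := (Nat.even_mul_succ_self k).two_dvd
      omega
    rw [harith]
    push_cast
    ring

theorem solution_spec : Claim_equal_solution := by
  intro price money count _
  unfold Spec_solution solution solution_alt
  by_cases hc : count > 0
  · have hcount : count = ((count.toNat : Nat) : Int) := by omega
    simp only [if_pos hc]
    rw [hcount, sum_loop]
    have hnat : 2 * (count.toNat * (count.toNat + 1) / 2 : Nat) = count.toNat * (count.toNat + 1) := by
      have hd : 2 ∣ count.toNat * (count.toNat + 1) := (Nat.even_mul_succ_self count.toNat).two_dvd
      omega
    have hcast : (2 : Int) * ((count.toNat * (count.toNat + 1) / 2 : Nat) : Int)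
        = ((count.toNat : Int)) * ((count.toNat : Int) + 1) := by
      exact_mod_cast hnat
    have h2 : price * ((count.toNat : Int)) * ((count.toNat : Int) + 1)
        = 2 * (price * ((count.toNat * (count.toNat + 1) / 2 : Nat) : Int)) := by
      rw [mul_assoc, ← hcast]; ring
    rw [h2]
    rw [show PySem.Int.floordiv (2 * (price * ((count.toNat * (count.toNat + 1) / 2 : Nat) : Int))) 2
        = price * ((count.toNat * (count.toNat + 1) / 2 : Nat) : Int) from by
      simp [PySem.Int.floordiv, Int.mul_fdiv_cancel_left _ (by norm_num : (2:Int) ≠ 0)]]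
    split_ifs with h <;> omega
  · have hnil : PySem.List.pyRange 1 (count + 1) 1 = [] :=
      PySem.List.pyRange_one_eq_nil (by omega)
    simp only [if_neg hc, hnil, List.foldl_nil]
    rw [show PySem.Int.floordiv (price * 0 * (0 + 1)) 2 = 0 from by
      simp [PySem.Int.floordiv]]
    split_ifs with h <;> omega
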